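-- pv_equiv track=rewrite | github.com/ZYH30/Causal-Uplift-Lab | getProxConAndRegVars.py | is_d_separated_bfs
-- ===== SOURCE A (Python) =====
-- import collections
--
-- def get_parents(graph: dict, node: str) -> set:
--     return set(graph.get(node, []))
--
-- def get_children(graph_adj: dict, node: str) -> set:
--     return set(graph_adj.get(node, []))
--
-- def is_d_separated_bfs(
--     start_node: str,
--     end_node: str,
--     given: set,
--     graph: dict,
--     graph_adj: dict,
--     descendants_cache: dict
-- ) -> bool:
--     """
--     使用 BFS (广度优先搜索) 检查 'start_node' 和 'end_node' 是否被 'given' d-分离。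
--     这是一种非路径枚举的高效算法 (O(V+E))。
--     它通过寻找是否存在任何 "活动路径" (active trail) 来工作。
--     """
--
--     # 状态元组: (node, direction)
--     # direction 'up' 意味着我们从一个子节点到达 'node' (e.g. child <- node)
--     # direction 'down' 意味着我们从一个父节点到达 'node' (e.g. parent -> node)
--     queue = collections.deque()
--     visited = set()
--
--     # 1. 初始化队列：从 start_node 向所有方向出发
--     # 向下 (-> children)
--     for child in get_children(graph_adj, start_node):
--         queue.append((child, 'down'))
--         visited.add((child, 'down'))
--
--     # 向上 (-> parents)
--     for parent in get_parents(graph, start_node):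
--         queue.append((parent, 'up'))
--         visited.add((parent, 'up'))
--
--     # 2. 开始 BFS 遍历
--     while queue:
--         current_node, direction = queue.popleft()
--
--         if current_node == end_node:
--             # 找到了一个活动路径！它们 *没有* d-分离。
--             return False
--
--         # --- 检查路径是否在 current_node 处被阻断 ---
--
--         # 检查 current_node 是否是碰撞点且被 "激活"
--         is_activated_collider = False
--         if current_node in given or given.intersection(descendants_cache.get(current_node, set())):
--             is_activated_collider = True
--
--         # --- 根据来的方向，决定下一步如何走 ---
--
--         if direction == 'up':
--             # 路径形如: ...child <- current_node
--
--             # 1. 向上走 (链): ...child <- current_node <- parent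
--             # 仅当 current_node (非碰撞点) *不在* given 中时，路径才活动
--             if current_node not in given:
--                 for parent in get_parents(graph, current_node):
--                     if (parent, 'up') not in visited:
--                         visited.add((parent, 'up'))
--                         queue.append((parent, 'up'))
--
--             # 2. 向下走 (分叉): ...child <- current_node -> other_child
--             # 仅当 current_node (非碰撞点) *不在* given 中时，路径才活动
--             if current_node not in given:
--                 for child in get_children(graph_adj, current_node):
--                     if (child, 'down') not in visited:
--                         visited.add((child, 'down'))
--                         queue.append((child, 'down'))
--
--         elif direction == 'down':
--             # 路径形如: ...parent -> current_node
--
--             # 1. 向上走 (碰撞): ...parent -> current_node <- other_parent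
--             # 仅当 current_node (碰撞点) *被激活* 时，路径才活动
--             if is_activated_collider:
--                 for parent in get_parents(graph, current_node):
--                     if (parent, 'up') not in visited:
--                         visited.add((parent, 'up'))
--                         queue.append((parent, 'up'))
--
--             # 2. 向下走 (链): ...parent -> current_node -> child
--             # 仅当 current_node (非碰撞点) *不在* given 中时，路径才活动
--             if current_node not in given:
--                 for child in get_children(graph_adj, current_node):
--                     if (child, 'down') not in visited:
--                         visited.add((child, 'down'))
--                         queue.append((child, 'down'))
--
--     # 队列为空，且从未到达 end_node。
--     # 意味着所有路径都被阻断了，它们 *是* d-分离的。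
--     return True
-- ===== SOURCE B (Python) =====
-- def is_d_separated_bfs(start_node, end_node, given, graph, graph_adj, descendants_cache):
--     # Level-synchronous fixpoint: saturate the set of active (node, direction)
--     # states, then scan it for end_node (no queue, no early return).
--     def active_succ(node, direction):
--         out = []
--         if direction == 'up':
--             if node not in given:
--                 out += [(p, 'up') for p in graph.get(node, [])]
--                 out += [(c, 'down') for c in graph_adj.get(node, [])]
--         else:
--             if node in given or given.intersection(descendants_cache.get(node, ())):
--                 out += [(p, 'up') for p in graph.get(node, [])]
--             if node not in given:
--                 out += [(c, 'down') for c in graph_adj.get(node, [])]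
--         return out
--
--     reached = {(c, 'down') for c in graph_adj.get(start_node, [])} \
--             | {(p, 'up') for p in graph.get(start_node, [])}
--     while True:
--         new = reached | {t for s in reached for t in active_succ(*s)}
--         if new == reached:
--             break
--         reached = new
--     return all(node != end_node for (node, _) in reached)
-- ===== Notes on version B (the rewrite author's own statement) =====
-- stated objective: alternative
-- what changed: Replaces the explicit BFS worklist (deque + per-state visited checks + early return on dequeue) by a level-synchronous fixpoint computation: repeatedly union the set of active (node,direction) states with its one-step image until it stabilises, then scan the saturated set for end_node.
import Mathlib
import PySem

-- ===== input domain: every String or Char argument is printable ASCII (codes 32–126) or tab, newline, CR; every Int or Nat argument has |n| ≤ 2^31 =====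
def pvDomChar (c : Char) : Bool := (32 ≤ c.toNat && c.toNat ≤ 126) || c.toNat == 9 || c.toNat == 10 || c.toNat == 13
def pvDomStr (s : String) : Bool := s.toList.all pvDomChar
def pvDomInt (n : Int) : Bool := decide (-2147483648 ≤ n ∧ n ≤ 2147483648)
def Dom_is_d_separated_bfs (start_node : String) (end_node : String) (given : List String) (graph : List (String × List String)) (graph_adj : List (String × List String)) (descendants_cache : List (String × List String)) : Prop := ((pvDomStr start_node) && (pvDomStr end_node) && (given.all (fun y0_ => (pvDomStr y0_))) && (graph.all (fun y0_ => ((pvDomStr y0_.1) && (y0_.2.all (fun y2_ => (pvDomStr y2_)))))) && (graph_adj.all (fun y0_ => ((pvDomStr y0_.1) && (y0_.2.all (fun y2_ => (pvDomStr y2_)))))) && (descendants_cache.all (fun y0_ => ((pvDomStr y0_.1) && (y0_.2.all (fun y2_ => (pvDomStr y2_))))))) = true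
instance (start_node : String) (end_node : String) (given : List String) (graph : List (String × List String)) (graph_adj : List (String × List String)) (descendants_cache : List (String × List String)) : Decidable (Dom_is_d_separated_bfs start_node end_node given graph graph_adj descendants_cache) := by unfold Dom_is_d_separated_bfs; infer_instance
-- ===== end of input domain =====

-- B replaces A's BFS worklist (deque + visited + early return) by a level-synchronous
-- fixpoint saturation of the active (node,direction) state set, then a final scan; same
-- return value, no speed claim.


-- ===== PORT A =====

-- set(graph.get(node, []))
def pvParents (graph : List (String × List String)) (node : String) : PySem.Set String :=
  PySem.Set.ofList ((PySem.Dict.mk graph).getD node [])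

-- set(graph_adj.get(node, []))
def pvChildren (graph_adj : List (String × List String)) (node : String) : PySem.Set String :=
  PySem.Set.ofList ((PySem.Dict.mk graph_adj).getD node [])

-- "for n in nodes: if (n,tag) not in visited: visited.add((n,tag)); queue.append((n,tag))"
def pvEnq (tag : String) (nodes : List String)
    (qv : List (String × String) × PySem.Set (String × String)) :
    List (String × String) × PySem.Set (String × String) :=
  match nodes with
  | [] => qv
  | n :: ns =>
    if PySem.Set.contains qv.2 (n, tag) then pvEnq tag ns qv
    else pvEnq tag ns (qv.1 ++ [(n, tag)], PySem.Set.add qv.2 (n, tag))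

-- all states either port can ever enqueue (termination universe; not part of the algorithm)
def pvU (graph graph_adj : List (String × List String)) : Finset (String × String) :=
  ((graph.flatMap (fun kv => kv.2.map (fun p => (p, "up")))) ++
   (graph_adj.flatMap (fun kv => kv.2.map (fun c => (c, "down"))))).toFinset

-- termination measure for A's BFS loop
def pvMu (graph graph_adj : List (String × List String))
    (q : List (String × String)) (v : PySem.Set (String × String)) : Nat :=
  q.length + 2 * ((pvU graph graph_adj).card - ((v : List (String × String)).toFinset ∩ pvU graph graph_adj).card)

lemma pv_getD_mk_sub (l : List (String × List String)) (k x : String)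
    (hx : x ∈ (PySem.Dict.mk l).getD k []) : ∃ kv ∈ l, x ∈ kv.2 := by
  induction l with
  | nil => simp [PySem.Dict.getD, PySem.Dict.get?] at hx
  | cons kv rest ih =>
    rw [PySem.Dict.getD_eq_get?_getD, PySem.Dict.get?_mk_cons] at hx
    by_cases h : (kv.1 == k) = true
    · rw [if_pos h] at hx
      exact ⟨kv, by simp, by simpa using hx⟩
    · rw [if_neg h, ← PySem.Dict.getD_eq_get?_getD] at hx
      obtain ⟨kv', h1, h2⟩ := ih hx
      exact ⟨kv', by simp [h1], h2⟩

lemma pv_map_up_U (graph graph_adj : List (String × List String)) (node : String) :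
    ∀ t ∈ ((PySem.Dict.mk graph).getD node []).map (fun p => (p, "up")),
      t ∈ pvU graph graph_adj := by
  intro t ht
  obtain ⟨p, hp, rfl⟩ := List.mem_map.mp ht
  obtain ⟨kv, h1, h2⟩ := pv_getD_mk_sub _ _ _ hp
  simp only [pvU, List.mem_toFinset, List.mem_append, List.mem_flatMap]
  exact Or.inl ⟨kv, h1, by simp; exact h2⟩

lemma pv_map_down_U (graph graph_adj : List (String × List String)) (node : String) :
    ∀ t ∈ ((PySem.Dict.mk graph_adj).getD node []).map (fun c => (c, "down")),
      t ∈ pvU graph graph_adj := by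
  intro t ht
  obtain ⟨c, hc, rfl⟩ := List.mem_map.mp ht
  obtain ⟨kv, h1, h2⟩ := pv_getD_mk_sub _ _ _ hc
  simp only [pvU, List.mem_toFinset, List.mem_append, List.mem_flatMap]
  exact Or.inr ⟨kv, h1, by simp; exact h2⟩

lemma pv_parents_U (graph graph_adj : List (String × List String)) (node n : String)
    (h : n ∈ pvParents graph node) : (n, "up") ∈ pvU graph graph_adj := by
  rw [pvParents, PySem.Set.mem_ofList] at h
  exact pv_map_up_U graph graph_adj node (n, "up") (List.mem_map.mpr ⟨n, h, rfl⟩)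

lemma pv_children_U (graph graph_adj : List (String × List String)) (node c : String)
    (h : c ∈ pvChildren graph_adj node) : (c, "down") ∈ pvU graph graph_adj := by
  rw [pvChildren, PySem.Set.mem_ofList] at h
  exact pv_map_down_U graph graph_adj node (c, "down") (List.mem_map.mpr ⟨c, h, rfl⟩)

lemma pvEnq_mu (graph graph_adj : List (String × List String)) (tag : String)
    (nodes : List String) (qv : List (String × String) × PySem.Set (String × String))
    (hU : ∀ n ∈ nodes, (n, tag) ∈ pvU graph graph_adj) :
    pvMu graph graph_adj (pvEnq tag nodes qv).1 (pvEnq tag nodes qv).2 ≤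
      pvMu graph graph_adj qv.1 qv.2 := by
  induction nodes generalizing qv with
  | nil => simp [pvEnq]
  | cons n ns ih =>
    rw [pvEnq]
    by_cases h : PySem.Set.contains qv.2 (n, tag) = true
    · rw [if_pos h]
      exact ih qv (fun m hm => hU m (by simp [hm]))
    · rw [if_neg h]
      refine le_trans (ih _ (fun m hm => hU m (by simp [hm]))) ?_
      have hnm : (n, tag) ∉ (qv.2 : List (String × String)) := by
        intro hc; exact h ((PySem.Set.contains_iff _ _).mpr hc)
      rw [PySem.Set.add_of_not_mem hnm]
      simp only [pvMu, List.length_append, List.length_singleton]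
      have hins : ((qv.2 ++ [(n, tag)] : List (String × String)).toFinset ∩ pvU graph graph_adj)
          = insert (n, tag) ((qv.2 : List (String × String)).toFinset ∩ pvU graph graph_adj) := by
        rw [List.toFinset_append]
        simp only [List.toFinset_cons, List.toFinset_nil, insert_empty_eq]
        ext x
        simp only [Finset.mem_inter, Finset.mem_union, Finset.mem_singleton, Finset.mem_insert]
        have := hU n (List.mem_cons_self ..)
        constructor
        · rintro ⟨h1 | h1, h2⟩
          · exact Or.inr ⟨h1, h2⟩
          · exact Or.inl h1
        · rintro (h1 | ⟨h1, h2⟩)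
          · exact ⟨Or.inr h1, h1 ▸ this⟩
          · exact ⟨Or.inl h1, h2⟩
      rw [hins]
      have hnotin : (n, tag) ∉ ((qv.2 : List (String × String)).toFinset ∩ pvU graph graph_adj) := by
        simp [hnm]
      rw [Finset.card_insert_of_notMem hnotin]
      have hle : ((qv.2 : List (String × String)).toFinset ∩ pvU graph graph_adj).card + 1 ≤ (pvU graph graph_adj).card := by
        have : insert (n, tag) ((qv.2 : List (String × String)).toFinset ∩ pvU graph graph_adj) ⊆ pvU graph graph_adj := by
          intro x hx
          rcases Finset.mem_insert.mp hx with h1 | h1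
          · subst h1; exact hU n (by simp)
          · exact (Finset.mem_inter.mp h1).2
        have := Finset.card_le_card this
        rwa [Finset.card_insert_of_notMem hnotin] at this
      omega

lemma pvEnq_mu_cond (graph graph_adj : List (String × List String)) (tag : String)
    (nodes : List String) (qv : List (String × String) × PySem.Set (String × String))
    (b : Bool)
    (hU : ∀ n ∈ nodes, (n, tag) ∈ pvU graph graph_adj) :
    pvMu graph graph_adj (if b then pvEnq tag nodes qv else qv).1
        (if b then pvEnq tag nodes qv else qv).2 ≤ pvMu graph graph_adj qv.1 qv.2 := by
  cases b
  · simp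
  · simpa using pvEnq_mu graph graph_adj tag nodes qv hU

-- the BFS loop of A ("while queue: …")
def pvALoop (end_node : String) (given : List String)
    (graph graph_adj descendants_cache : List (String × List String))
    (queue : List (String × String)) (visited : PySem.Set (String × String)) : Bool :=
  match queue with
  | [] => true
  | (current, dir) :: rest =>
    if current == end_node then false
    else
      let isAct : Bool := PySem.Set.contains given current ||
        !(PySem.Set.inter given ((PySem.Dict.mk descendants_cache).getD current [])).isEmpty
      if dir == "up" then
        let qv1 := if !(PySem.Set.contains given current)
          then pvEnq "up" (pvParents graph current) (rest, visited) else (rest, visited)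
        let qv2 := if !(PySem.Set.contains given current)
          then pvEnq "down" (pvChildren graph_adj current) qv1 else qv1
        pvALoop end_node given graph graph_adj descendants_cache qv2.1 qv2.2
      else if dir == "down" then
        let qv1 := if isAct
          then pvEnq "up" (pvParents graph current) (rest, visited) else (rest, visited)
        let qv2 := if !(PySem.Set.contains given current)
          then pvEnq "down" (pvChildren graph_adj current) qv1 else qv1
        pvALoop end_node given graph graph_adj descendants_cache qv2.1 qv2.2
      else
        pvALoop end_node given graph graph_adj descendants_cache rest visited
termination_by pvMu graph graph_adj queue visited
decreasing_by
  · refine lt_of_le_of_lt (le_trans (pvEnq_mu_cond _ _ _ _ _ _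
      (fun c hc => pv_children_U graph graph_adj current c hc)) (pvEnq_mu_cond _ _ _ _ _ _
      (fun p hp => pv_parents_U graph graph_adj current p hp))) ?_
    simp [pvMu]
  · refine lt_of_le_of_lt (le_trans (pvEnq_mu_cond _ _ _ _ _ _
      (fun c hc => pv_children_U graph graph_adj current c hc)) (pvEnq_mu_cond _ _ _ _ _ _
      (fun p hp => pv_parents_U graph graph_adj current p hp))) ?_
    simp [pvMu]
  · simp [pvMu]

def is_d_separated_bfs (start_node : String) (end_node : String) (given : List String) (graph : List (String × List String)) (graph_adj : List (String × List String)) (descendants_cache : List (String × List String)) : Bool :=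
  let qv1 := (pvChildren graph_adj start_node).foldl
    (fun qv c => (qv.1 ++ [(c, "down")], PySem.Set.add qv.2 (c, "down")))
    ([], PySem.Set.empty)
  let qv2 := (pvParents graph start_node).foldl
    (fun qv p => (qv.1 ++ [(p, "up")], PySem.Set.add qv.2 (p, "up"))) qv1
  pvALoop end_node given graph graph_adj descendants_cache qv2.1 qv2.2

-- ===== PORT B =====

-- B's active_succ(node, direction)
def pvSuccAlt (given : List String)
    (graph graph_adj descendants_cache : List (String × List String))
    (node dir : String) : List (String × String) :=
  if dir == "up" then
    if !(PySem.Set.contains given node) then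
      ((PySem.Dict.mk graph).getD node []).map (fun p => (p, "up")) ++
      ((PySem.Dict.mk graph_adj).getD node []).map (fun c => (c, "down"))
    else []
  else
    (if PySem.Set.contains given node ||
        !(PySem.Set.inter given ((PySem.Dict.mk descendants_cache).getD node [])).isEmpty then
      ((PySem.Dict.mk graph).getD node []).map (fun p => (p, "up"))
     else []) ++
    (if !(PySem.Set.contains given node) then
      ((PySem.Dict.mk graph_adj).getD node []).map (fun c => (c, "down"))
     else [])

lemma pvSuccAlt_U (given : List String)
    (graph graph_adj descendants_cache : List (String × List String)) (node dir : String) :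
    ∀ t ∈ pvSuccAlt given graph graph_adj descendants_cache node dir,
      t ∈ pvU graph graph_adj := by
  intro t ht
  unfold pvSuccAlt at ht
  split at ht
  · split at ht
    · rcases List.mem_append.mp ht with h | h
      · exact pv_map_up_U graph graph_adj node t h
      · exact pv_map_down_U graph graph_adj node t h
    · simp at ht
  · rcases List.mem_append.mp ht with h | h
    · split at h
      · exact pv_map_up_U graph graph_adj node t h
      · simp at h
    · split at h
      · exact pv_map_down_U graph graph_adj node t h
      · simp at h

lemma pvBLoop_dec (graph graph_adj : List (String × List String))
    (reached newS : PySem.Set (String × String))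
    (hsub : ∀ x ∈ (reached : List (String × String)), x ∈ (newS : List (String × String)))
    (hU : ∀ x ∈ (newS : List (String × String)),
      x ∉ (reached : List (String × String)) → x ∈ pvU graph graph_adj)
    (hne : ¬ PySem.Set.equal newS reached = true) :
    (pvU graph graph_adj).card + 1 -
        ((newS : List (String × String)).toFinset ∩ pvU graph graph_adj).card <
      (pvU graph graph_adj).card + 1 -
        ((reached : List (String × String)).toFinset ∩ pvU graph graph_adj).card := by
  have hx : ∃ x, x ∈ (newS : List (String × String)) ∧ x ∉ (reached : List (String × String)) := by
    by_contra hall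
    refine hne ((PySem.Set.equal_iff _ _).mpr (fun x => ⟨fun h => ?_, fun h => hsub x h⟩))
    by_contra hxr
    exact hall ⟨x, h, hxr⟩
  obtain ⟨x, hxn, hxr⟩ := hx
  have hxU : x ∈ pvU graph graph_adj := hU x hxn hxr
  have hss : (reached : List (String × String)).toFinset ∩ pvU graph graph_adj ⊂
      (newS : List (String × String)).toFinset ∩ pvU graph graph_adj := by
    constructor
    · intro y hy
      rw [Finset.mem_inter] at hy ⊢
      exact ⟨List.mem_toFinset.mpr (hsub y (List.mem_toFinset.mp hy.1)), hy.2⟩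
    · intro hcon
      have : x ∈ (reached : List (String × String)).toFinset ∩ pvU graph graph_adj :=
        hcon (Finset.mem_inter.mpr ⟨List.mem_toFinset.mpr hxn, hxU⟩)
      exact hxr (List.mem_toFinset.mp (Finset.mem_inter.mp this).1)
  have hlt := Finset.card_lt_card hss
  have hle : ((newS : List (String × String)).toFinset ∩ pvU graph graph_adj).card ≤
      (pvU graph graph_adj).card := Finset.card_le_card (Finset.inter_subset_right)
  omega

-- B's saturation loop ("while True: new = reached | image; if new == reached: break; reached = new")
def pvBLoop (given : List String)
    (graph graph_adj descendants_cache : List (String × List String))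
    (reached : PySem.Set (String × String)) : PySem.Set (String × String) :=
  let newS := PySem.Set.union reached
    ((reached : List (String × String)).flatMap
      (fun s => pvSuccAlt given graph graph_adj descendants_cache s.1 s.2))
  if PySem.Set.equal newS reached then reached
  else pvBLoop given graph graph_adj descendants_cache newS
termination_by (pvU graph graph_adj).card + 1 - ((reached : List (String × String)).toFinset ∩ pvU graph graph_adj).card
decreasing_by
  rename_i hne
  apply pvBLoop_dec
  · intro x hx
    exact (PySem.Set.mem_union ..).mpr (Or.inl hx)
  · intro x hxn hxr
    rcases (PySem.Set.mem_union ..).mp hxn with h | h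
    · exact absurd h hxr
    · rw [List.mem_flatMap] at h
      obtain ⟨st, _, hs⟩ := h
      exact pvSuccAlt_U given graph graph_adj descendants_cache (↑st : String × String).1 (↑st : String × String).2 x hs
  · exact hne

def is_d_separated_bfs_alt (start_node : String) (end_node : String) (given : List String) (graph : List (String × List String)) (graph_adj : List (String × List String)) (descendants_cache : List (String × List String)) : Bool :=
  let reached0 := PySem.Set.union
    (PySem.Set.ofList (((PySem.Dict.mk graph_adj).getD start_node []).map (fun c => (c, "down"))))
    (((PySem.Dict.mk graph).getD start_node []).map (fun p => (p, "up")))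
  let final := pvBLoop given graph graph_adj descendants_cache reached0
  (final : List (String × String)).all (fun s => s.1 != end_node)

-- ===== PRECONDITION & SPEC =====
def Spec_is_d_separated_bfs (start_node : String) (end_node : String) (given : List String) (graph : List (String × List String)) (graph_adj : List (String × List String)) (descendants_cache : List (String × List String)) (out : Bool) : Prop := out = is_d_separated_bfs_alt start_node end_node given graph graph_adj descendants_cache
instance (start_node : String) (end_node : String) (given : List String) (graph : List (String × List String)) (graph_adj : List (String × List String)) (descendants_cache : List (String × List String)) (out : Bool) : Decidable (Spec_is_d_separated_bfs start_node end_node given graph graph_adj descendants_cache out) := by unfold Spec_is_d_separated_bfs; infer_instance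

-- ===== CLAIM (what is proved, stated in full; the proofs are below) =====
def Claim_equal_is_d_separated_bfs : Prop := ∀ (start_node : String) (end_node : String) (given : List String) (graph : List (String × List String)) (graph_adj : List (String × List String)) (descendants_cache : List (String × List String)), Dom_is_d_separated_bfs start_node end_node given graph graph_adj descendants_cache → Spec_is_d_separated_bfs start_node end_node given graph graph_adj descendants_cache (is_d_separated_bfs start_node end_node given graph graph_adj descendants_cache)

-- ===== LEMMAS AND PROOFS =====

-- one step of an active trail, as B's successor function; guarded as A explores it
-- (A never expands a state whose node is end_node)
def pvStepA (end_node : String) (given : List String)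
    (graph graph_adj descendants_cache : List (String × List String))
    (a b : String × String) : Prop :=
  a.1 ≠ end_node ∧ b ∈ pvSuccAlt given graph graph_adj descendants_cache a.1 a.2

def pvStepF (given : List String)
    (graph graph_adj descendants_cache : List (String × List String))
    (a b : String × String) : Prop :=
  b ∈ pvSuccAlt given graph graph_adj descendants_cache a.1 a.2

-- "an end state is reachable (in A's guarded sense) from some state of q"
def pvFound (end_node : String) (given : List String)
    (graph graph_adj descendants_cache : List (String × List String))
    (q : List (String × String)) : Prop :=
  ∃ s ∈ q, ∃ t, Relation.ReflTransGen (pvStepA end_node given graph graph_adj descendants_cache) s t ∧ t.1 = end_node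

-- A's loop invariant
def pvInv (end_node : String) (given : List String)
    (graph graph_adj descendants_cache : List (String × List String))
    (q : List (String × String)) (v : PySem.Set (String × String)) : Prop :=
  (∀ s ∈ q, s ∈ (v : List (String × String))) ∧
  (∀ s ∈ (v : List (String × String)), s.2 = "up" ∨ s.2 = "down") ∧
  (∀ s ∈ (v : List (String × String)), s ∈ q ∨
    (s.1 ≠ end_node ∧ ∀ t ∈ pvSuccAlt given graph graph_adj descendants_cache s.1 s.2,
      t ∈ (v : List (String × String))))


lemma pvSuccAlt_tag (given : List String)
    (graph graph_adj descendants_cache : List (String × List String)) (node dir : String) :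
    ∀ t ∈ pvSuccAlt given graph graph_adj descendants_cache node dir,
      t.2 = "up" ∨ t.2 = "down" := by
  intro t ht
  unfold pvSuccAlt at ht
  split at ht
  · split at ht
    · rcases List.mem_append.mp ht with h | h
      · obtain ⟨p, _, rfl⟩ := List.mem_map.mp h; left; rfl
      · obtain ⟨c, _, rfl⟩ := List.mem_map.mp h; right; rfl
    · simp at ht
  · rcases List.mem_append.mp ht with h | h
    · split at h
      · obtain ⟨p, _, rfl⟩ := List.mem_map.mp h; left; rfl
      · simp at h
    · split at h
      · obtain ⟨c, _, rfl⟩ := List.mem_map.mp h; right; rfl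
      · simp at h

lemma pvEnq_delta (tag : String) (nodes : List String)
    (q : List (String × String)) (v : PySem.Set (String × String)) :
    ∃ Δ : List (String × String),
      pvEnq tag nodes (q, v) = (q ++ Δ, v ++ Δ) ∧
      (∀ x ∈ Δ, (∃ n ∈ nodes, x = (n, tag)) ∧ x ∉ (v : List (String × String))) ∧
      (∀ n ∈ nodes, (n, tag) ∈ v ++ Δ) := by
  induction nodes generalizing q v with
  | nil => exact ⟨[], by simp [pvEnq], by simp, by simp⟩
  | cons n ns ih =>
    by_cases h : PySem.Set.contains v (n, tag) = true
    · obtain ⟨Δ, h1, h2, h3⟩ := ih q v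
      refine ⟨Δ, by simp only [pvEnq, if_pos h]; exact h1, ?_, ?_⟩
      · intro x hx
        obtain ⟨⟨m, hm, rfl⟩, hnv⟩ := h2 x hx
        exact ⟨⟨m, by simp [hm], rfl⟩, hnv⟩
      · intro m hm
        rcases List.mem_cons.mp hm with rfl | hm
        · exact List.mem_append_left _ ((PySem.Set.contains_iff _ _).mp h)
        · exact h3 m hm
    · have hnm : (n, tag) ∉ (v : List (String × String)) := fun hc =>
        h ((PySem.Set.contains_iff _ _).mpr hc)
      obtain ⟨Δ, h1, h2, h3⟩ := ih (q ++ [(n, tag)]) (v ++ [(n, tag)])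
      refine ⟨(n, tag) :: Δ, ?_, ?_, ?_⟩
      · simp only [pvEnq, if_neg h, PySem.Set.add_of_not_mem hnm]
        rw [h1]; simp
      · intro x hx
        rcases List.mem_cons.mp hx with rfl | hx
        · exact ⟨⟨n, by simp, rfl⟩, hnm⟩
        · obtain ⟨⟨m, hm, rfl⟩, hnv⟩ := h2 x hx
          exact ⟨⟨m, by simp [hm], rfl⟩, fun hc => hnv (List.mem_append_left _ hc)⟩
      · intro m hm
        rcases List.mem_cons.mp hm with rfl | hm
        · simp
        · have := h3 m hm
          simpa using this

lemma pvEnqIf_delta (b : Bool) (tag : String) (nodes : List String)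
    (q : List (String × String)) (v : PySem.Set (String × String)) :
    ∃ Δ : List (String × String),
      (if b then pvEnq tag nodes (q, v) else (q, v)) = (q ++ Δ, v ++ Δ) ∧
      (∀ x ∈ Δ, (b = true ∧ ∃ n ∈ nodes, x = (n, tag)) ∧ x ∉ (v : List (String × String))) ∧
      (b = true → ∀ n ∈ nodes, (n, tag) ∈ v ++ Δ) := by
  cases b
  · exact ⟨[], by simp, by simp, by simp⟩
  · obtain ⟨Δ, h1, h2, h3⟩ := pvEnq_delta tag nodes q v
    exact ⟨Δ, by simpa using h1, fun x hx => ⟨⟨rfl, (h2 x hx).1⟩, (h2 x hx).2⟩, fun _ => h3⟩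

-- if an end state is A-reachable from any visited state, it is A-reachable from the queue
lemma pvEscape (end_node : String) (given : List String)
    (graph graph_adj descendants_cache : List (String × List String))
    (q : List (String × String)) (v : PySem.Set (String × String))
    (hinv : pvInv end_node given graph graph_adj descendants_cache q v)
    (t : String × String) (hte : t.1 = end_node) :
    ∀ u, Relation.ReflTransGen (pvStepA end_node given graph graph_adj descendants_cache) u t →
      u ∈ (v : List (String × String)) →
      pvFound end_node given graph graph_adj descendants_cache q := by
  intro u hrtg
  induction hrtg using Relation.ReflTransGen.head_induction_on with
  | refl =>
    intro hu
    rcases hinv.2.2 t hu with hq | ⟨hne, _⟩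
    · exact ⟨t, hq, t, .refl, hte⟩
    · exact absurd hte hne
  | @head a c hstep hrtg ih =>
    intro hu
    rcases hinv.2.2 a hu with hq | ⟨hne, hcl⟩
    · exact ⟨a, hq, t, Relation.ReflTransGen.head hstep hrtg, hte⟩
    · exact ih (hcl _ hstep.2)

-- processing one non-end state preserves the invariant and the reachability verdict
lemma pvProcess (end_node : String) (given : List String)
    (graph graph_adj descendants_cache : List (String × List String))
    (current dir : String) (rest : List (String × String))
    (v : PySem.Set (String × String)) (Δ : List (String × String))
    (hinv : pvInv end_node given graph graph_adj descendants_cache ((current, dir) :: rest) v)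
    (hcur : current ≠ end_node)
    (hΔ : ∀ x ∈ Δ, x ∈ pvSuccAlt given graph graph_adj descendants_cache current dir)
    (hcover : ∀ t ∈ pvSuccAlt given graph graph_adj descendants_cache current dir,
      t ∈ v ++ Δ) :
    pvInv end_node given graph graph_adj descendants_cache (rest ++ Δ) (v ++ Δ) ∧
    (pvFound end_node given graph graph_adj descendants_cache (rest ++ Δ) ↔
      pvFound end_node given graph graph_adj descendants_cache ((current, dir) :: rest)) := by
  obtain ⟨hq, htag, hcl⟩ := hinv
  have hcurv : (current, dir) ∈ (v : List (String × String)) := hq _ (List.mem_cons_self ..)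
  have hinv' : pvInv end_node given graph graph_adj descendants_cache (rest ++ Δ) (v ++ Δ) := by
    refine ⟨?_, ?_, ?_⟩
    · intro s hs
      rcases List.mem_append.mp hs with h | h
      · exact List.mem_append_left _ (hq s (List.mem_cons_of_mem _ h))
      · exact List.mem_append_right _ h
    · intro s hs
      rcases List.mem_append.mp hs with h | h
      · exact htag s h
      · exact pvSuccAlt_tag given graph graph_adj descendants_cache current dir s (hΔ s h)
    · intro s hs
      rcases List.mem_append.mp hs with h | h
      · rcases hcl s h with hq' | ⟨hne, hclosed⟩
        · rcases List.mem_cons.mp hq' with rfl | hr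
          · exact Or.inr ⟨hcur, fun t ht => hcover t ht⟩
          · exact Or.inl (List.mem_append_left _ hr)
        · exact Or.inr ⟨hne, fun t ht => List.mem_append_left _ (hclosed t ht)⟩
      · exact Or.inl (List.mem_append_right _ h)
  refine ⟨hinv', ?_, ?_⟩
  · rintro ⟨s, hs, t, hchain, hte⟩
    rcases List.mem_append.mp hs with h | h
    · exact ⟨s, List.mem_cons_of_mem _ h, t, hchain, hte⟩
    · refine ⟨(current, dir), List.mem_cons_self .., t, ?_, hte⟩
      exact Relation.ReflTransGen.head ⟨hcur, hΔ s h⟩ hchain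
  · rintro ⟨s, hs, t, hchain, hte⟩
    rcases List.mem_cons.mp hs with rfl | hr
    · rcases (Relation.ReflTransGen.cases_head hchain) with rfl | ⟨u, hstep, hrest⟩
      · exact absurd hte hcur
      · have hu : u ∈ v ++ Δ := hcover u hstep.2
        rcases List.mem_append.mp hu with huv | huΔ
        · exact pvEscape end_node given graph graph_adj descendants_cache
            (rest ++ Δ) (v ++ Δ) hinv' t hte u hrest (List.mem_append_left _ huv)
        · exact ⟨u, List.mem_append_right _ huΔ, t, hrest, hte⟩
    · exact ⟨s, List.mem_append_left _ hr, t, hchain, hte⟩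

lemma pvALoop_correct (end_node : String) (given : List String)
    (graph graph_adj descendants_cache : List (String × List String))
    (q : List (String × String)) (v : PySem.Set (String × String))
    (hinv : pvInv end_node given graph graph_adj descendants_cache q v) :
    (pvALoop end_node given graph graph_adj descendants_cache q v = false ↔
      pvFound end_node given graph graph_adj descendants_cache q) := by
  revert hinv
  induction q, v using pvALoop.induct end_node given graph graph_adj descendants_cache with
  | case1 visited =>
    intro _
    constructor
    · intro h
      rw [pvALoop] at h
      exact absurd h (by simp)
    · rintro ⟨s, hs, _⟩
      exact absurd hs (List.not_mem_nil)
  | case2 visited current dir rest h1 =>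
    intro _
    constructor
    · intro _
      exact ⟨(current, dir), List.mem_cons_self .., (current, dir), .refl, by simpa using h1⟩
    · intro _
      rw [pvALoop]
      simp [h1]
  | case3 visited current dir rest h1 h2 qv1 qv2 ih =>
    intro hinv
    have hcur : current ≠ end_node := by simpa using h1
    have hdir : dir = "up" := by simpa using h2
    subst hdir
    obtain ⟨Δ1, hE1, hΔ1, hC1⟩ := pvEnqIf_delta (!PySem.Set.contains given current) "up"
      (pvParents graph current) rest visited
    obtain ⟨Δ2, hE2, hΔ2, hC2⟩ := pvEnqIf_delta (!PySem.Set.contains given current) "down"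
      (pvChildren graph_adj current) (rest ++ Δ1) (visited ++ Δ1)
    have hq2 : qv2 = (rest ++ (Δ1 ++ Δ2), visited ++ (Δ1 ++ Δ2)) := by
      simp only [qv2, qv1, dite_eq_ite, hE1, hE2, List.append_assoc]
    have hΔ : ∀ x ∈ Δ1 ++ Δ2, x ∈ pvSuccAlt given graph graph_adj descendants_cache current "up" := by
      intro x hx
      unfold pvSuccAlt
      rw [if_pos (by simp)]
      rcases List.mem_append.mp hx with h | h
      · obtain ⟨⟨hcond, n, hn, rfl⟩, -⟩ := hΔ1 x h
        rw [if_pos hcond]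
        refine List.mem_append_left _ (List.mem_map.mpr ⟨n, ?_, rfl⟩)
        rw [pvParents] at hn
        exact (PySem.Set.mem_ofList ..).mp hn
      · obtain ⟨⟨hcond, n, hn, rfl⟩, -⟩ := hΔ2 x h
        rw [if_pos hcond]
        refine List.mem_append_right _ (List.mem_map.mpr ⟨n, ?_, rfl⟩)
        rw [pvChildren] at hn
        exact (PySem.Set.mem_ofList ..).mp hn
    have hcover : ∀ t ∈ pvSuccAlt given graph graph_adj descendants_cache current "up",
        t ∈ visited ++ (Δ1 ++ Δ2) := by
      intro t ht
      unfold pvSuccAlt at ht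
      rw [if_pos (by simp)] at ht
      by_cases hg : (!PySem.Set.contains given current) = true
      · rw [if_pos hg] at ht
        rcases List.mem_append.mp ht with h | h
        · obtain ⟨p, hp, rfl⟩ := List.mem_map.mp h
          have hm := hC1 hg p (by rw [pvParents]; exact (PySem.Set.mem_ofList ..).mpr hp)
          rcases List.mem_append.mp hm with h' | h'
          · exact List.mem_append_left _ h'
          · exact List.mem_append_right _ (List.mem_append_left _ h')
        · obtain ⟨c, hc, rfl⟩ := List.mem_map.mp h
          have hm := hC2 hg c (by rw [pvChildren]; exact (PySem.Set.mem_ofList ..).mpr hc)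
          simpa [List.append_assoc] using hm
      · rw [if_neg hg] at ht
        exact absurd ht (List.not_mem_nil)
    obtain ⟨hinv', hfound⟩ := pvProcess end_node given graph graph_adj descendants_cache
      current "up" rest visited (Δ1 ++ Δ2) hinv hcur hΔ hcover
    have hih := ih (by rw [hq2]; exact hinv')
    rw [hq2] at hih
    have hloop : pvALoop end_node given graph graph_adj descendants_cache
        ((current, "up") :: rest) visited =
        pvALoop end_node given graph graph_adj descendants_cache qv2.1 qv2.2 := by
      conv_lhs => rw [pvALoop.eq_def]
      simp only [h1, h2, Bool.false_eq_true, if_true, if_false, qv2, qv1, dite_eq_ite]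
    rw [hloop, hq2]
    exact hih.trans hfound
  | case4 visited current dir rest h1 isAct h2 h3 qv1 qv2 ih =>
    intro hinv
    have hcur : current ≠ end_node := by simpa using h1
    have hdir : dir = "down" := by simpa using h3
    subst hdir
    obtain ⟨Δ1, hE1, hΔ1, hC1⟩ := pvEnqIf_delta isAct
      "up" (pvParents graph current) rest visited
    obtain ⟨Δ2, hE2, hΔ2, hC2⟩ := pvEnqIf_delta (!PySem.Set.contains given current) "down"
      (pvChildren graph_adj current) (rest ++ Δ1) (visited ++ Δ1)
    have hq2 : qv2 = (rest ++ (Δ1 ++ Δ2), visited ++ (Δ1 ++ Δ2)) := by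
      simp only [qv2, qv1, dite_eq_ite, hE1, hE2, List.append_assoc]
    have hΔ : ∀ x ∈ Δ1 ++ Δ2, x ∈ pvSuccAlt given graph graph_adj descendants_cache current "down" := by
      intro x hx
      unfold pvSuccAlt
      rw [if_neg (by simp)]
      rcases List.mem_append.mp hx with h | h
      · obtain ⟨⟨hcond, n, hn, rfl⟩, -⟩ := hΔ1 x h
        rw [if_pos (show (PySem.Set.contains given current ||
            !(PySem.Set.inter given ((PySem.Dict.mk descendants_cache).getD current [])).isEmpty) = true
            from by simpa [isAct] using hcond)]
        refine List.mem_append_left _ (List.mem_map.mpr ⟨n, ?_, rfl⟩)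
        rw [pvParents] at hn
        exact (PySem.Set.mem_ofList ..).mp hn
      · obtain ⟨⟨hcond, n, hn, rfl⟩, -⟩ := hΔ2 x h
        rw [if_pos hcond]
        refine List.mem_append_right _ (List.mem_map.mpr ⟨n, ?_, rfl⟩)
        rw [pvChildren] at hn
        exact (PySem.Set.mem_ofList ..).mp hn
    have hcover : ∀ t ∈ pvSuccAlt given graph graph_adj descendants_cache current "down",
        t ∈ visited ++ (Δ1 ++ Δ2) := by
      intro t ht
      unfold pvSuccAlt at ht
      rw [if_neg (by simp)] at ht
      rcases List.mem_append.mp ht with h | h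
      · by_cases hg : isAct = true
        · rw [if_pos (show (PySem.Set.contains given current ||
              !(PySem.Set.inter given ((PySem.Dict.mk descendants_cache).getD current [])).isEmpty) = true
              from by simpa [isAct] using hg)] at h
          obtain ⟨p, hp, rfl⟩ := List.mem_map.mp h
          have hm := hC1 hg p (by rw [pvParents]; exact (PySem.Set.mem_ofList ..).mpr hp)
          rcases List.mem_append.mp hm with h' | h'
          · exact List.mem_append_left _ h'
          · exact List.mem_append_right _ (List.mem_append_left _ h')
        · rw [if_neg hg] at h
          exact absurd h (List.not_mem_nil)
      · by_cases hg : (!PySem.Set.contains given current) = true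
        · rw [if_pos hg] at h
          obtain ⟨c, hc, rfl⟩ := List.mem_map.mp h
          have hm := hC2 hg c (by rw [pvChildren]; exact (PySem.Set.mem_ofList ..).mpr hc)
          simpa [List.append_assoc] using hm
        · rw [if_neg hg] at h
          exact absurd h (List.not_mem_nil)
    obtain ⟨hinv', hfound⟩ := pvProcess end_node given graph graph_adj descendants_cache
      current "down" rest visited (Δ1 ++ Δ2) hinv hcur hΔ hcover
    have hih := ih (by rw [hq2]; exact hinv')
    rw [hq2] at hih
    have hloop : pvALoop end_node given graph graph_adj descendants_cache
        ((current, "down") :: rest) visited =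
        pvALoop end_node given graph graph_adj descendants_cache qv2.1 qv2.2 := by
      conv_lhs => rw [pvALoop.eq_def]
      simp only [h1, h2, h3, Bool.false_eq_true, if_true, if_false, qv2, qv1, isAct, dite_eq_ite]
    rw [hloop, hq2]
    exact hih.trans hfound
  | case5 visited current dir rest h1 h2 h3 ih =>
    intro hinv
    have hmem := hinv.1 (current, dir) (List.mem_cons_self ..)
    rcases hinv.2.1 (current, dir) hmem with h | h
    · exact absurd h (by simpa using h2)
    · exact absurd h (by simpa using h3)


lemma pvBLoop_mem (given : List String)
    (graph graph_adj descendants_cache : List (String × List String))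
    (reached : PySem.Set (String × String)) :
    ∀ x, x ∈ (pvBLoop given graph graph_adj descendants_cache reached : List (String × String)) ↔
      ∃ s ∈ (reached : List (String × String)),
        Relation.ReflTransGen (pvStepF given graph graph_adj descendants_cache) s x := by
  fun_induction pvBLoop given graph graph_adj descendants_cache reached with
  | case1 reached newS hstop =>
    have hNP : newS = PySem.Set.union reached
        (List.flatMap (fun s => pvSuccAlt given graph graph_adj descendants_cache s.1 s.2)
          (reached : List (String × String))) := by
      simp only [newS, List.flatMap_subtype, List.unattach_attach]
    intro x
    dsimp only
    rw [← hNP, if_pos hstop]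
    constructor
    · intro hx
      exact ⟨x, hx, .refl⟩
    · rintro ⟨s, hs, hchain⟩
      induction hchain with
      | refl => exact hs
      | tail hrtg hstep ih2 =>
        rename_i m x'
        have hx' : x' ∈ (newS : List (String × String)) := by
          rw [hNP]
          exact (PySem.Set.mem_union ..).mpr (Or.inr (List.mem_flatMap.mpr ⟨m, ih2, hstep⟩))
        exact ((PySem.Set.equal_iff _ _).mp hstop x').mp hx'
  | case2 reached newS hstop ih =>
    have hNP : newS = PySem.Set.union reached
        (List.flatMap (fun s => pvSuccAlt given graph graph_adj descendants_cache s.1 s.2)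
          (reached : List (String × String))) := by
      simp only [newS, List.flatMap_subtype, List.unattach_attach]
    intro x
    dsimp only
    rw [← hNP, if_neg hstop, ih x]
    constructor
    · rintro ⟨s, hs, hchain⟩
      rw [hNP] at hs
      rcases (PySem.Set.mem_union ..).mp hs with h | h
      · exact ⟨s, h, hchain⟩
      · obtain ⟨r, hr, hsucc⟩ := List.mem_flatMap.mp h
        exact ⟨r, hr, Relation.ReflTransGen.head hsucc hchain⟩
    · rintro ⟨s, hs, hchain⟩
      refine ⟨s, ?_, hchain⟩
      rw [hNP]
      exact (PySem.Set.mem_union ..).mpr (Or.inl hs)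

lemma pvReach_guard (end_node : String) (given : List String)
    (graph graph_adj descendants_cache : List (String × List String))
    (s t : String × String)
    (h : Relation.ReflTransGen (pvStepF given graph graph_adj descendants_cache) s t)
    (hte : t.1 = end_node) :
    ∃ t', Relation.ReflTransGen (pvStepA end_node given graph graph_adj descendants_cache) s t' ∧
      t'.1 = end_node := by
  induction h using Relation.ReflTransGen.head_induction_on with
  | refl => exact ⟨t, .refl, hte⟩
  | @head a c hstep hrtg ih =>
    by_cases ha : a.1 = end_node
    · exact ⟨a, .refl, ha⟩
    · obtain ⟨t', h1, h2⟩ := ih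
      exact ⟨t', Relation.ReflTransGen.head ⟨ha, hstep⟩ h1, h2⟩


lemma pvInitFold (tag : String) (l : List String)
    (qv : List (String × String) × PySem.Set (String × String)) :
    l.foldl (fun qv c => (qv.1 ++ [(c, tag)], PySem.Set.add qv.2 (c, tag))) qv =
      (qv.1 ++ l.map (fun c => (c, tag)),
       PySem.Set.update qv.2 (l.map (fun c => (c, tag)))) := by
  induction l generalizing qv with
  | nil => simp [PySem.Set.update]
  | cons c l ih =>
    rw [List.foldl_cons, ih]
    simp [PySem.Set.update_cons]

lemma pvFound_congr (end_node : String) (given : List String)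
    (graph graph_adj descendants_cache : List (String × List String))
    (L1 L2 : List (String × String)) (h : ∀ x, x ∈ L1 ↔ x ∈ L2) :
    pvFound end_node given graph graph_adj descendants_cache L1 ↔
      pvFound end_node given graph graph_adj descendants_cache L2 := by
  constructor
  · rintro ⟨s, hs, t, hc, hte⟩
    exact ⟨s, (h s).mp hs, t, hc, hte⟩
  · rintro ⟨s, hs, t, hc, hte⟩
    exact ⟨s, (h s).mpr hs, t, hc, hte⟩

lemma pvFoundF_iff (end_node : String) (given : List String)
    (graph graph_adj descendants_cache : List (String × List String))
    (L : List (String × String)) :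
    (∃ s ∈ L, ∃ t, Relation.ReflTransGen (pvStepF given graph graph_adj descendants_cache) s t ∧
        t.1 = end_node) ↔
      pvFound end_node given graph graph_adj descendants_cache L := by
  constructor
  · rintro ⟨s, hs, t, hc, hte⟩
    obtain ⟨t', h1, h2⟩ := pvReach_guard end_node given graph graph_adj descendants_cache s t hc hte
    exact ⟨s, hs, t', h1, h2⟩
  · rintro ⟨s, hs, t, hc, hte⟩
    exact ⟨s, hs, t, Relation.ReflTransGen.mono (fun a b h => h.2) hc, hte⟩

-- ===== VERDICT (by name: the statement is the Claim_ definition above) =====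
theorem is_d_separated_bfs_spec : Claim_equal_is_d_separated_bfs := by
  unfold Claim_equal_is_d_separated_bfs Spec_is_d_separated_bfs
  intro start_node end_node given graph graph_adj descendants_cache _
  have hA : (is_d_separated_bfs start_node end_node given graph graph_adj descendants_cache = false) ↔
      pvFound end_node given graph graph_adj descendants_cache
        ((pvChildren graph_adj start_node).map (fun c => (c, "down")) ++
         (pvParents graph start_node).map (fun p => (p, "up"))) := by
    unfold is_d_separated_bfs
    simp only [pvInitFold, List.nil_append]
    apply pvALoop_correct
    have hmem : ∀ x : String × String,
        x ∈ (PySem.Set.update (PySem.Set.update PySem.Set.empty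
            ((pvChildren graph_adj start_node).map (fun c => (c, "down"))))
            ((pvParents graph start_node).map (fun p => (p, "up"))) : List (String × String)) ↔
          x ∈ (pvChildren graph_adj start_node).map (fun c => (c, "down")) ++
            (pvParents graph start_node).map (fun p => (p, "up")) := by
      intro x
      simp only [PySem.Set.mem_update, List.mem_append]
      constructor
      · rintro ((h | h) | h)
        · exact absurd h (List.not_mem_nil)
        · exact Or.inl h
        · exact Or.inr h
      · rintro (h | h)
        · exact Or.inl (Or.inr h)
        · exact Or.inr h
    refine ⟨fun s hs => (hmem s).mpr hs, ?_, fun s hs => Or.inl ((hmem s).mp hs)⟩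
    intro s hs
    rcases List.mem_append.mp ((hmem s).mp hs) with h | h
    · obtain ⟨c, -, rfl⟩ := List.mem_map.mp h
      exact Or.inr rfl
    · obtain ⟨p, -, rfl⟩ := List.mem_map.mp h
      exact Or.inl rfl
  have hB : (is_d_separated_bfs_alt start_node end_node given graph graph_adj descendants_cache = false) ↔
      pvFound end_node given graph graph_adj descendants_cache
        ((((PySem.Dict.mk graph_adj).getD start_node []).map (fun c => (c, "down"))) ++
         (((PySem.Dict.mk graph).getD start_node []).map (fun p => (p, "up")))) := by
    unfold is_d_separated_bfs_alt
    rw [← pvFoundF_iff]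
    constructor
    · intro hall
      obtain ⟨x, hxf, hxp⟩ := List.all_eq_false.mp hall
      have hxe : x.1 = end_node := by simpa using hxp
      obtain ⟨s, hs, hchain⟩ := (pvBLoop_mem given graph graph_adj descendants_cache _ x).mp hxf
      refine ⟨s, ?_, x, hchain, hxe⟩
      rcases (PySem.Set.mem_union ..).mp hs with h | h
      · exact List.mem_append_left _ ((PySem.Set.mem_ofList ..).mp h)
      · exact List.mem_append_right _ h
    · rintro ⟨s, hs, t, hchain, hte⟩
      refine List.all_eq_false.mpr ⟨t, ?_, by simpa using hte⟩
      refine (pvBLoop_mem given graph graph_adj descendants_cache _ t).mpr ⟨s, ?_, hchain⟩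
      rcases List.mem_append.mp hs with h | h
      · exact (PySem.Set.mem_union ..).mpr (Or.inl ((PySem.Set.mem_ofList ..).mpr h))
      · exact (PySem.Set.mem_union ..).mpr (Or.inr h)
  have hcong : pvFound end_node given graph graph_adj descendants_cache
        ((pvChildren graph_adj start_node).map (fun c => (c, "down")) ++
         (pvParents graph start_node).map (fun p => (p, "up"))) ↔
      pvFound end_node given graph graph_adj descendants_cache
        ((((PySem.Dict.mk graph_adj).getD start_node []).map (fun c => (c, "down"))) ++
         (((PySem.Dict.mk graph).getD start_node []).map (fun p => (p, "up")))) := by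
    apply pvFound_congr
    intro x
    simp only [List.mem_append, List.mem_map, pvChildren, pvParents]
    constructor
    · rintro (⟨c, hc, rfl⟩ | ⟨p, hp, rfl⟩)
      · exact Or.inl ⟨c, (PySem.Set.mem_ofList ..).mp hc, rfl⟩
      · exact Or.inr ⟨p, (PySem.Set.mem_ofList ..).mp hp, rfl⟩
    · rintro (⟨c, hc, rfl⟩ | ⟨p, hp, rfl⟩)
      · exact Or.inl ⟨c, (PySem.Set.mem_ofList ..).mpr hc, rfl⟩
      · exact Or.inr ⟨p, (PySem.Set.mem_ofList ..).mpr hp, rfl⟩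
  have h1 := hA.trans (hcong.trans hB.symm)
  revert h1
  generalize is_d_separated_bfs start_node end_node given graph graph_adj descendants_cache = a
  generalize is_d_separated_bfs_alt start_node end_node given graph graph_adj descendants_cache = b
  intro h1
  cases a <;> cases b <;> simp_all
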